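-- pv_equiv track=rewrite | github.com/unlimitediw/CheckCode | 0.算法/20180823.py | reconstructList
-- ===== SOURCE A (Python) =====
-- def reconstructList(ini):
--     ini.sort()
--     left = ini[0][0]
--     right = ini[0][1]
--     length = 0
--     res = []
--     randomMap = []
--     for i in range(1, len(ini)):
--         if ini[i][0] > right:
--             res.append([left, right])
--             length += right - left + 1
--             randomMap.append(length)
--             left = ini[i][0]
--             right = ini[i][1]
--         elif ini[i][1] > right:
--             right = ini[i][1]
--     res.append([left, right])
--     length += right - left + 1
--     randomMap.append(length)
--     return res, randomMap
-- ===== SOURCE B (Python) =====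
-- def reconstructList(ini):
--     ini.sort()
--     acc = []  # merged groups in right-to-left order; acc[-1] is the leftmost group so far
--     for iv in reversed(ini):
--         s, e = iv[0], iv[1]
--         # absorb every already-built group this interval reaches
--         while acc and acc[-1][0] <= e:
--             top = acc.pop()
--             if top[1] > e:
--                 e = top[1]
--         acc.append([s, e])
--     res = acc[::-1]
--     randomMap = []
--     total = 0
--     for l, r in res:
--         total += r - l + 1
--         randomMap.append(total)
--     return res, randomMap
-- ===== Notes on version B (the rewrite author's own statement) =====
-- stated objective: alternative
-- what changed: B scans the sorted intervals BACKWARDS, keeping a stack of already-merged groups and, for each interval, popping and absorbing every group it reaches (a stack-absorption pass instead of A's forward sweep with scalar left/right state), then computes randomMap as prefix sums in a second pass.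
import Mathlib
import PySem

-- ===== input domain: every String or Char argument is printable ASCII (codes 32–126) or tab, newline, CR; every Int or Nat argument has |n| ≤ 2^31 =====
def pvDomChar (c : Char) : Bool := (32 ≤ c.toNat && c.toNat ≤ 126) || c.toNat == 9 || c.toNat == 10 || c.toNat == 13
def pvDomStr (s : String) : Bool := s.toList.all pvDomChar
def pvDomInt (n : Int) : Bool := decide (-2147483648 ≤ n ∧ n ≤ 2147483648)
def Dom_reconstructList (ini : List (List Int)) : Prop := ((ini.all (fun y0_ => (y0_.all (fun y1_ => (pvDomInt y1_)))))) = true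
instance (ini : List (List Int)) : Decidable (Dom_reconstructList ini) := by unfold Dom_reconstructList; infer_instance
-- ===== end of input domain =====

-- B replaces A's forward sweep (scalar left/right/length state) by a BACKWARD scan with a
-- stack of merged groups, absorbing every reachable group per interval, plus a separate
-- prefix-sum pass for randomMap; return values are proved equal; both Pythons sort the
-- argument in place (that mutation is outside the claim, which is about the return value).

-- ===== PORT A =====
-- one loop step: the body of `for i in range(1, len(ini))`, given the element ini[i]
def pvStepA (st : Int × Int × Int × List (List Int) × List Int) (e : List Int) :
    Int × Int × Int × List (List Int) × List Int :=
  let (left, right, length, res, randomMap) := st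
  if PySem.List.pyGetD e 0 0 > right then
    let length' := length + right - left + 1
    (PySem.List.pyGetD e 0 0, PySem.List.pyGetD e 1 0, length',
     res ++ [[left, right]], randomMap ++ [length'])
  else if PySem.List.pyGetD e 1 0 > right then
    (left, PySem.List.pyGetD e 1 0, length, res, randomMap)
  else st

def reconstructList (ini : List (List Int)) : List (List Int) × List Int :=
  let s := PySem.List.sorted ini (fun x => x) false   -- ini.sort() (in-place in Python)
  let first := PySem.List.pyGetD s 0 []
  let left := PySem.List.pyGetD first 0 0
  let right := PySem.List.pyGetD first 1 0
  let st := (PySem.List.pyRange 1 (s.length : Int) 1).foldl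
      (fun acc j => pvStepA acc (PySem.List.pyGetD s j [])) (left, right, 0, [], [])
  let (l', r', len', res', rm') := st
  (res' ++ [[l', r']], rm' ++ [len' + r' - l' + 1])

-- ===== PORT B =====
-- Python's stack `acc` (append/pop at the end) is modelled REVERSED: the head of the Lean
-- list is Python's acc[-1]; hence `res = acc[::-1]` is the model list itself.
-- the `while acc and acc[-1][0] <= e: top = acc.pop(); if top[1] > e: e = top[1]` loop
def pvAbsorb : List (List Int) → Int → List (List Int) × Int
  | [], e => ([], e)
  | top :: rest, e =>
    if PySem.List.pyGetD top 0 0 ≤ e then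
      pvAbsorb rest (if PySem.List.pyGetD top 1 0 > e then PySem.List.pyGetD top 1 0 else e)
    else (top :: rest, e)

-- the body of `for iv in reversed(ini)`
def pvStepB (acc : List (List Int)) (iv : List Int) : List (List Int) :=
  let s := PySem.List.pyGetD iv 0 0
  let e := PySem.List.pyGetD iv 1 0
  let (acc', e') := pvAbsorb acc e
  [s, e'] :: acc'

-- second pass: `total += r - l + 1; randomMap.append(total)` over res
def pvPfxB (total : Int) : List (List Int) → List Int
  | [] => []
  | iv :: rest =>
    let t := total + PySem.List.pyGetD iv 1 0 - PySem.List.pyGetD iv 0 0 + 1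
    t :: pvPfxB t rest

def reconstructList_alt (ini : List (List Int)) : List (List Int) × List Int :=
  let s := PySem.List.sorted ini (fun x => x) false   -- ini.sort() (in-place in Python)
  let res := s.reverse.foldl pvStepB []               -- backward scan; model already = acc[::-1]
  (res, pvPfxB 0 res)

-- ===== PRECONDITION & SPEC =====
-- Pre_ excludes exactly the inputs where Python A raises IndexError: an empty list
-- (ini[0] fails) or an inner list with fewer than 2 elements (ini[i][1] fails).
def Pre_reconstructList (ini : List (List Int)) : Prop :=
  ini ≠ [] ∧ ∀ l ∈ ini, 2 ≤ l.length
instance (ini : List (List Int)) : Decidable (Pre_reconstructList ini) := by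
  unfold Pre_reconstructList; infer_instance
def pvWitness_reconstructList : List (List Int) := [[1, 3], [2, 5], [8, 9]]

def Spec_reconstructList (ini : List (List Int)) (out : List (List Int) × List Int) : Prop := out = reconstructList_alt ini
instance (ini : List (List Int)) (out : List (List Int) × List Int) : Decidable (Spec_reconstructList ini out) := by unfold Spec_reconstructList; infer_instance

-- ===== CLAIM (what is proved, stated in full; the proofs are below) =====
def Claim_equal_reconstructList : Prop := ∀ (ini : List (List Int)), Dom_reconstructList ini → Pre_reconstructList ini → Spec_reconstructList ini (reconstructList ini)

-- ===== LEMMAS AND PROOFS =====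

-- the abstract forward sweep both ports are reduced to
def pvSweep (l r : Int) : List (List Int) → List (List Int)
  | [] => [[l, r]]
  | iv :: t =>
    if PySem.List.pyGetD iv 0 0 > r then
      [l, r] :: pvSweep (PySem.List.pyGetD iv 0 0) (PySem.List.pyGetD iv 1 0) t
    else if PySem.List.pyGetD iv 1 0 > r then pvSweep l (PySem.List.pyGetD iv 1 0) t
    else pvSweep l r t

def pvLen (iv : List Int) : Int :=
  PySem.List.pyGetD iv 1 0 - PySem.List.pyGetD iv 0 0 + 1

def pvSum : List (List Int) → Int
  | [] => 0
  | iv :: rest => pvLen iv + pvSum rest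

lemma pvPfxB_append (t : Int) (res : List (List Int)) (iv : List Int) :
    pvPfxB t (res ++ [iv]) = pvPfxB t res ++ [t + (pvSum res + pvLen iv)] := by
  induction res generalizing t with
  | nil => simp [pvPfxB, pvSum, pvLen]; ring
  | cons x xs ih =>
    simp only [List.cons_append, pvPfxB, ih, pvSum, pvLen]
    congr 3
    ring

lemma pvSum_append (res : List (List Int)) (iv : List Int) :
    pvSum (res ++ [iv]) = pvSum res + pvLen iv := by
  induction res with
  | nil => simp [pvSum]
  | cons x xs ih => simp [pvSum, ih]; ring

-- A's epilogue (final append) as explicit projections of the fold state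
def pvFinA (st : Int × Int × Int × List (List Int) × List Int) : List (List Int) × List Int :=
  (st.2.2.2.1 ++ [[st.1, st.2.1]], st.2.2.2.2 ++ [st.2.2.1 + st.2.1 - st.1 + 1])

-- A's fold computes the sweep plus the interleaved bookkeeping
lemma pvMainA (xs : List (List Int)) :
    ∀ (l r len : Int) (res : List (List Int)) (rm : List Int),
    len = pvSum res → rm = pvPfxB 0 res →
    pvFinA (xs.foldl pvStepA (l, r, len, res, rm)) =
    (res ++ pvSweep l r xs, pvPfxB 0 (res ++ pvSweep l r xs)) := by
  induction xs with
  | nil =>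
    intro l r len res rm hlen hrm
    simp only [List.foldl_nil, pvSweep, pvFinA]
    have h2 := pvPfxB_append 0 res [l, r]
    have h3 : pvLen [l, r] = r - l + 1 := by
      simp [pvLen, PySem.List.pyGetD, PySem.List.pyGet?, PySem.List.pyIdx?]
    rw [h2, h3, ← hlen, ← hrm]
    have : 0 + (len + (r - l + 1)) = len + r - l + 1 := by ring
    rw [this]
  | cons e rest ih =>
    intro l r len res rm hlen hrm
    simp only [List.foldl_cons]
    by_cases h1 : PySem.List.pyGetD e 0 0 > r
    · have hA : pvStepA (l, r, len, res, rm) e =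
          (PySem.List.pyGetD e 0 0, PySem.List.pyGetD e 1 0, len + r - l + 1,
           res ++ [[l, r]], rm ++ [len + r - l + 1]) := by
        simp [pvStepA, h1]
      rw [hA]
      have hiv : pvLen [l, r] = r - l + 1 := by
        simp [pvLen, PySem.List.pyGetD, PySem.List.pyGet?, PySem.List.pyIdx?]
      have h4 : len + r - l + 1 = pvSum (res ++ [[l, r]]) := by
        rw [pvSum_append, ← hlen, hiv]; ring
      have h5 : rm ++ [len + r - l + 1] = pvPfxB 0 (res ++ [[l, r]]) := by
        rw [pvPfxB_append, ← hrm, ← hlen, hiv]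
        have : 0 + (len + (r - l + 1)) = len + r - l + 1 := by ring
        rw [this]
      rw [ih _ _ _ _ _ h4 h5]
      simp only [pvSweep, if_pos h1, List.append_assoc, List.cons_append, List.nil_append]
    · by_cases h2 : PySem.List.pyGetD e 1 0 > r
      · have hA : pvStepA (l, r, len, res, rm) e =
            (l, PySem.List.pyGetD e 1 0, len, res, rm) := by
          simp [pvStepA, h1, h2]
        rw [hA, ih _ _ _ _ _ hlen hrm]
        simp only [pvSweep, if_neg h1, if_pos h2]
      · have hA : pvStepA (l, r, len, res, rm) e = (l, r, len, res, rm) := by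
          simp [pvStepA, h1, h2]
        rw [hA, ih _ _ _ _ _ hlen hrm]
        simp only [pvSweep, if_neg h1, if_neg h2]

-- every sweep output starts with a group whose left endpoint is the given l
lemma pvSweep_head (t : List (List Int)) : ∀ l r, ∃ R G, pvSweep l r t = [l, R] :: G := by
  induction t with
  | nil => intro l r; exact ⟨r, [], rfl⟩
  | cons g u ih =>
    intro l r
    simp only [pvSweep]
    split_ifs with h1 h2
    · exact ⟨r, _, rfl⟩
    · exact ih l _
    · exact ih l r

-- one absorption step on a group whose left endpoint is reachable / unreachable
lemma pvAbsorb_cons_le (l R e : Int) (X : List (List Int)) (h : l ≤ e) :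
    pvAbsorb ([l, R] :: X) e = pvAbsorb X (max R e) := by
  have hl : PySem.List.pyGetD [l, R] 0 0 = l := by
    simp [PySem.List.pyGetD, PySem.List.pyGet?, PySem.List.pyIdx?]
  have hr : PySem.List.pyGetD [l, R] 1 0 = R := by
    simp [PySem.List.pyGetD, PySem.List.pyGet?, PySem.List.pyIdx?]
  simp only [pvAbsorb, hl, hr, if_pos h]
  congr 1
  omega

lemma pvAbsorb_cons_gt (l R e : Int) (X : List (List Int)) (h : ¬ l ≤ e) :
    pvAbsorb ([l, R] :: X) e = ([l, R] :: X, e) := by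
  have hl : PySem.List.pyGetD [l, R] 0 0 = l := by
    simp [PySem.List.pyGetD, PySem.List.pyGet?, PySem.List.pyIdx?]
  simp only [pvAbsorb, hl, if_neg h]

-- absorbing a sweep result into a larger interval re-sweeps with the max right end
lemma pvKey (t : List (List Int)) :
    ∀ (l r e : Int), l ≤ e →
    ∀ s : Int, [s, (pvAbsorb (pvSweep l r t) e).2] :: (pvAbsorb (pvSweep l r t) e).1 =
      pvSweep s (max r e) t := by
  induction t with
  | nil =>
    intro l r e hle s
    have h0 : pvSweep l r [] = [[l, r]] := rfl
    rw [h0, pvAbsorb_cons_le l r e [] hle]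
    simp [pvAbsorb, pvSweep]
  | cons g u ih =>
    intro l r e hle s
    by_cases h1 : PySem.List.pyGetD g 0 0 > r
    · have h0 : pvSweep l r (g :: u) =
          [l, r] :: pvSweep (PySem.List.pyGetD g 0 0) (PySem.List.pyGetD g 1 0) u := by
        simp only [pvSweep, if_pos h1]
      rw [h0, pvAbsorb_cons_le l r e _ hle]
      by_cases hg : PySem.List.pyGetD g 0 0 ≤ max r e
      · rw [ih (PySem.List.pyGetD g 0 0) (PySem.List.pyGetD g 1 0) (max r e) hg s]
        have hrhs : pvSweep s (max r e) (g :: u) =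
            if PySem.List.pyGetD g 1 0 > max r e then pvSweep s (PySem.List.pyGetD g 1 0) u
            else pvSweep s (max r e) u := by
          simp only [pvSweep]
          rw [if_neg (by omega : ¬ PySem.List.pyGetD g 0 0 > max r e)]
        rw [hrhs]
        by_cases hg1 : PySem.List.pyGetD g 1 0 > max r e
        · rw [if_pos hg1]
          have : max (PySem.List.pyGetD g 1 0) (max r e) = PySem.List.pyGetD g 1 0 := by omega
          rw [this]
        · rw [if_neg hg1]
          have : max (PySem.List.pyGetD g 1 0) (max r e) = max r e := by omega
          rw [this]
      · obtain ⟨R, G, hG⟩ := pvSweep_head u (PySem.List.pyGetD g 0 0) (PySem.List.pyGetD g 1 0)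
        rw [hG, pvAbsorb_cons_gt _ _ _ _ hg]
        simp only [pvSweep]
        rw [if_pos (by omega : PySem.List.pyGetD g 0 0 > max r e), hG]
    · by_cases h2 : PySem.List.pyGetD g 1 0 > r
      · have h0 : pvSweep l r (g :: u) = pvSweep l (PySem.List.pyGetD g 1 0) u := by
          simp only [pvSweep, if_neg h1, if_pos h2]
        rw [h0, ih l (PySem.List.pyGetD g 1 0) e hle s]
        have hrhs : pvSweep s (max r e) (g :: u) =
            if PySem.List.pyGetD g 1 0 > max r e then pvSweep s (PySem.List.pyGetD g 1 0) u
            else pvSweep s (max r e) u := by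
          simp only [pvSweep]
          rw [if_neg (by omega : ¬ PySem.List.pyGetD g 0 0 > max r e)]
        rw [hrhs]
        by_cases hg1 : PySem.List.pyGetD g 1 0 > max r e
        · rw [if_pos hg1]
          have : max (PySem.List.pyGetD g 1 0) e = PySem.List.pyGetD g 1 0 := by omega
          rw [this]
        · rw [if_neg hg1]
          have : max (PySem.List.pyGetD g 1 0) e = max r e := by omega
          rw [this]
      · have h0 : pvSweep l r (g :: u) = pvSweep l r u := by
          simp only [pvSweep, if_neg h1, if_neg h2]
        rw [h0, ih l r e hle s]
        simp only [pvSweep]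
        rw [if_neg (by omega : ¬ PySem.List.pyGetD g 0 0 > max r e),
            if_neg (by omega : ¬ PySem.List.pyGetD g 1 0 > max r e)]

-- the groups of the whole (sorted) list
def pvGroups : List (List Int) → List (List Int)
  | [] => []
  | h :: t => pvSweep (PySem.List.pyGetD h 0 0) (PySem.List.pyGetD h 1 0) t

lemma pvStepB_groups (t : List (List Int)) (iv : List Int) :
    pvStepB (pvGroups t) iv = pvGroups (iv :: t) := by
  cases t with
  | nil =>
    simp [pvGroups, pvStepB, pvAbsorb, pvSweep]
  | cons h u =>
    simp only [pvGroups, pvStepB]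
    by_cases hle : PySem.List.pyGetD h 0 0 ≤ PySem.List.pyGetD iv 1 0
    · rw [pvKey u (PySem.List.pyGetD h 0 0) (PySem.List.pyGetD h 1 0)
        (PySem.List.pyGetD iv 1 0) hle (PySem.List.pyGetD iv 0 0)]
      simp only [pvSweep]
      rw [if_neg (by omega : ¬ PySem.List.pyGetD h 0 0 > PySem.List.pyGetD iv 1 0)]
      by_cases hg1 : PySem.List.pyGetD h 1 0 > PySem.List.pyGetD iv 1 0
      · rw [if_pos hg1]
        have : max (PySem.List.pyGetD h 1 0) (PySem.List.pyGetD iv 1 0) =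
            PySem.List.pyGetD h 1 0 := by omega
        rw [this]
      · rw [if_neg hg1]
        have : max (PySem.List.pyGetD h 1 0) (PySem.List.pyGetD iv 1 0) =
            PySem.List.pyGetD iv 1 0 := by omega
        rw [this]
    · obtain ⟨R, G, hG⟩ := pvSweep_head u (PySem.List.pyGetD h 0 0) (PySem.List.pyGetD h 1 0)
      rw [hG, pvAbsorb_cons_gt _ _ _ _ hle]
      simp only [pvSweep]
      rw [if_pos (by omega : PySem.List.pyGetD h 0 0 > PySem.List.pyGetD iv 1 0), hG]

lemma pvFoldB (s : List (List Int)) : s.reverse.foldl pvStepB [] = pvGroups s := by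
  induction s with
  | nil => rfl
  | cons h t ih =>
    rw [List.reverse_cons, List.foldl_append, ih, List.foldl_cons, List.foldl_nil,
      pvStepB_groups]

-- ===== VERDICT (by name: the statement is the Claim_ definition above) =====
theorem reconstructList_spec : Claim_equal_reconstructList := by
  intro ini _ hpre
  unfold Spec_reconstructList reconstructList reconstructList_alt
  set s := PySem.List.sorted ini (fun x => x) false with hs
  simp only []
  rw [PySem.List.foldl_pyRange_pyGetD' s [] pvStepA _ (by norm_num)]
  rw [pvFoldB]
  obtain ⟨hne, _⟩ := hpre
  have hsne : s ≠ [] := by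
    rw [hs, Ne, PySem.List.sorted_eq_nil_iff]; exact hne
  obtain ⟨h, t, hht⟩ := List.exists_cons_of_ne_nil hsne
  rw [hht]
  have h0 : PySem.List.pyGetD (h :: t) 0 [] = h := by
    simp [PySem.List.pyGetD, PySem.List.pyGet?, PySem.List.pyIdx?]
  rw [h0]
  have hd : List.drop (Int.toNat 1) (h :: t) = t := rfl
  rw [hd]
  have := pvMainA t (PySem.List.pyGetD h 0 0) (PySem.List.pyGetD h 1 0) 0 [] [] rfl rfl
  simp only [pvFinA, List.nil_append] at this
  rw [this]
  simp [pvGroups]
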